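-- pv_equiv track=rewrite | github.com/LimHaksu/algorithm | programmers/python/level2/땅따먹기.py | solution
-- ===== SOURCE A (Python) =====
-- def solution(land):
--     dp = [[0 for j in range(len(land[0]))] for i in range(len(land))]
--     for j in range(len(land[0])):
--         dp[0][j] = land[0][j]
--     for i in range(1, len(land)):
--         for j in range(len(land[i])):
--             my_max = 0
--             for k in range(len(land[i])):
--                 if j != k and dp[i-1][k] > my_max:
--                     my_max = dp[i-1][k]
--             dp[i][j] = land[i][j] + my_max
--
--     return max(dp[len(dp)-1])
-- ===== SOURCE B (Python) =====
-- def solution(land):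
--     prev = list(land[0])
--     for row in land[1:]:
--         m1 = 0
--         m2 = 0
--         i1 = -1
--         for k, v in enumerate(prev):
--             if v > m1:
--                 m2 = m1
--                 m1 = v
--                 i1 = k
--             elif v > m2:
--                 m2 = v
--         prev = [v + (m2 if k == i1 else m1) for k, v in enumerate(row)]
--     return max(prev)
-- ===== Notes on version B (the rewrite author's own statement) =====
-- stated objective: faster
-- what changed: Replaces the per-cell inner scan over all other columns by a single pass per row that keeps the previous row's top value, runner-up and top index, and replaces the n*c dp table by one rolling row.
-- outside the precondition, e.g. on solution([[1, 2], [3]]): A returns 3, B returns 5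
import Mathlib
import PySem

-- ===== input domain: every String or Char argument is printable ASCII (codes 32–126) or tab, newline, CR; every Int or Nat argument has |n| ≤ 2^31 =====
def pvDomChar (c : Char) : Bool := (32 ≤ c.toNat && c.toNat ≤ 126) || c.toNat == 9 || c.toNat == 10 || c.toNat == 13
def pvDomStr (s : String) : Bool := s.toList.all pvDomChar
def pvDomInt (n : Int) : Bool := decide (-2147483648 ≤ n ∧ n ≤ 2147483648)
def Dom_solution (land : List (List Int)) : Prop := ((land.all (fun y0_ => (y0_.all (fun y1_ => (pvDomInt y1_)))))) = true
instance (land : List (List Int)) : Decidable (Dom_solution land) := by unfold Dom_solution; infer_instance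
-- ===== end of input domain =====

set_option maxRecDepth 4000

-- B replaces A's inner scan over all other columns by a one-pass top-two (value, runner-up,
-- index) summary of the previous dp row, and A's full dp table by one rolling row.

-- ===== PORT A =====
-- A's my_max inner loop: running max over k ≠ j of prev[k], started at 0
def innerMax (w : Nat) (prev : List Int) (j : Nat) : Int :=
  (List.range w).foldl (fun m k => if j ≠ k ∧ prev.getD k 0 > m then prev.getD k 0 else m) 0

def solution (land : List (List Int)) : Int :=
  -- dp = [[0 for j in range(len(land[0]))] for i in range(len(land))]
  let dp0 : List (List Int) :=
    (List.range land.length).map (fun _ => (List.range (land.getD 0 []).length).map (fun _ => (0:Int)))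
  -- for j in range(len(land[0])): dp[0][j] = land[0][j]
  let dp1 := (List.range (land.getD 0 []).length).foldl
      (fun dp j => dp.set 0 ((dp.getD 0 []).set j ((land.getD 0 []).getD j 0))) dp0
  -- for i in range(1, len(land)): for j in range(len(land[i])): dp[i][j] = land[i][j] + my_max
  let dp2 := (List.range' 1 (land.length - 1)).foldl (fun dp i =>
      (List.range (land.getD i []).length).foldl (fun dp j =>
        dp.set i ((dp.getD i []).set j
          ((land.getD i []).getD j 0 + innerMax (land.getD i []).length (dp.getD (i-1) []) j))) dp) dp1
  -- return max(dp[len(dp)-1])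
  (PySem.List.max? (dp2.getD (dp2.length - 1) []) (fun x => x)).getD 0

-- ===== PORT B =====
-- Source B's top-two scan over prev: state (m1, m2, i1), starting (0, 0, -1)
def ttStep (s : Int × Int × Int) (kv : Int × Int) : Int × Int × Int :=
  if kv.2 > s.1 then (kv.2, s.1, kv.1)
  else if kv.2 > s.2.1 then (s.1, kv.2, s.2.2)
  else s

-- one row transition: prev = [v + (m2 if k == i1 else m1) for k, v in enumerate(row)]
def stepB (prev row : List Int) : List Int :=
  let t := (PySem.List.enumerate prev 0).foldl ttStep (0, 0, -1)
  (PySem.List.enumerate row 0).map (fun kv => kv.2 + (if kv.1 = t.2.2 then t.2.1 else t.1))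

def solution_alt (land : List (List Int)) : Int :=
  let last := land.tail.foldl stepB (land.getD 0 [])
  (PySem.List.max? last (fun x => x)).getD 0

-- ===== PRECONDITION & SPEC =====
-- Pre_ restricts to the task's natural domain: non-empty rectangular grids with at least one
-- column.  Outside it A either raises (empty grid, empty first row, a row longer than the
-- first) or, on grids with a row shorter than the first, returns a value built from leftover
-- zero dp cells — an artefact of its preallocated table — which B does not reproduce.
def Pre_solution (land : List (List Int)) : Prop :=
  land ≠ [] ∧ 0 < (land.getD 0 []).length ∧ ∀ row ∈ land, row.length = (land.getD 0 []).length
instance (land : List (List Int)) : Decidable (Pre_solution land) := by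
  unfold Pre_solution; infer_instance

def pvWitness_solution : List (List Int) := [[1, 2], [3, 4]]

def Spec_solution (land : List (List Int)) (out : Int) : Prop := out = solution_alt land
instance (land : List (List Int)) (out : Int) : Decidable (Spec_solution land out) := by
  unfold Spec_solution; infer_instance

-- ===== CLAIM (what is proved, stated in full; the proofs are below) =====
def Claim_equal_solution : Prop :=
  ∀ (land : List (List Int)), Dom_solution land → Pre_solution land → Spec_solution land (solution land)

-- ===== LEMMAS AND PROOFS =====
def ttSel (s : Int × Int × Int) (j : Int) : Int := if j = s.2.2 then s.2.1 else s.1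

def excStep (j : Int) (m : Int) (kv : Int × Int) : Int := if j ≠ kv.1 ∧ kv.2 > m then kv.2 else m

theorem ttStep_eq (m1 m2 i1 k v : Int) :
    ttStep (m1, m2, i1) (k, v)
      = if m1 < v then (v, m1, k) else if m2 < v then (m1, v, i1) else (m1, m2, i1) := rfl

theorem tt_step_sel (m1 m2 i1 k v j : Int) (h1 : m2 ≤ m1) (h2 : i1 < k) :
    excStep j (ttSel (m1, m2, i1) j) (k, v) = ttSel (ttStep (m1, m2, i1) (k, v)) j := by
  rw [ttStep_eq]
  simp only [excStep, ttSel]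
  split_ifs <;> dsimp only at * <;> omega

theorem tt_core (vs : List Int) : ∀ (k : Int) (s : Int × Int × Int),
    s.2.1 ≤ s.1 → s.2.2 < k →
    (((PySem.List.enumerate vs k).foldl ttStep s).2.1 ≤ ((PySem.List.enumerate vs k).foldl ttStep s).1)
    ∧ (((PySem.List.enumerate vs k).foldl ttStep s).2.2 < k + vs.length)
    ∧ ∀ j : Int, (PySem.List.enumerate vs k).foldl (excStep j) (ttSel s j)
        = ttSel ((PySem.List.enumerate vs k).foldl ttStep s) j := by
  induction vs with
  | nil => intro k s h1 h2; simp [PySem.List.enumerate_nil, ttSel]; constructor; exact h1; omega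
  | cons v vs ih =>
    intro k s h1 h2
    rw [PySem.List.enumerate_cons]
    simp only [List.foldl_cons]
    obtain ⟨m1, m2, i1⟩ := s
    simp only at h1 h2
    have h1' : (ttStep (m1, m2, i1) (k, v)).2.1 ≤ (ttStep (m1, m2, i1) (k, v)).1 := by
      rw [ttStep_eq]; split_ifs <;> simp <;> omega
    have h2' : (ttStep (m1, m2, i1) (k, v)).2.2 < k + 1 := by
      rw [ttStep_eq]; split_ifs <;> simp <;> omega
    obtain ⟨a1, a2, a3⟩ := ih (k + 1) (ttStep (m1, m2, i1) (k, v)) h1' h2'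
    refine ⟨a1, by simp only [List.length_cons] at a2 ⊢; push_cast at a2 ⊢; omega, fun j => ?_⟩
    rw [tt_step_sel m1 m2 i1 k v j h1 h2]
    exact a3 j


theorem enum_eq (xs : List Int) :
    PySem.List.enumerate xs 0 = (List.range xs.length).map (fun (k : Nat) => ((k : Int), xs.getD k 0)) := by
  apply List.ext_getElem
  · simp [PySem.List.length_enumerate]
  · intro k h1 h2
    have hk : k < xs.length := by simpa [PySem.List.length_enumerate] using h1
    rw [PySem.List.getElem_enumerate xs 0 k h1]
    simp [List.getD_eq_getElem?_getD, List.getElem?_eq_getElem hk]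

theorem innerA_eq_fold (prev : List Int) (j : Nat) :
    innerMax prev.length prev j = (PySem.List.enumerate prev 0).foldl (excStep (j : Int)) 0 := by
  rw [enum_eq, List.foldl_map]
  unfold innerMax
  apply List.foldl_ext
  intro m k _
  simp only [excStep, ne_eq, Ne, Int.natCast_inj]

def ttOf (prev : List Int) : Int × Int × Int := (PySem.List.enumerate prev 0).foldl ttStep (0, 0, -1)

theorem innerA_eq_sel (prev : List Int) (j : Nat) :
    innerMax prev.length prev j = ttSel (ttOf prev) (j : Int) := by
  obtain ⟨-, -, h3⟩ := tt_core prev 0 (0, 0, -1) (le_refl 0) (by norm_num)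
  have h0 : ttSel (0, 0, -1) (j : Int) = 0 := by
    simp only [ttSel]
    rw [if_neg (by omega)]
  rw [innerA_eq_fold, ← h0]
  exact h3 (j : Int)


def stepA (prev row : List Int) : List Int :=
  (List.range row.length).map (fun j => row.getD j 0 + innerMax row.length prev j)

theorem stepB_eq_stepA (prev row : List Int) (h : prev.length = row.length) :
    stepB prev row = stepA prev row := by
  unfold stepB stepA
  rw [enum_eq row, List.map_map]
  apply List.map_congr_left
  intro k _
  simp only [Function.comp]
  have hsel := innerA_eq_sel prev k
  simp only [ttOf, ttSel] at hsel
  rw [← hsel, h]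

-- getD/set toolkit
theorem getD_set_eq (l : List (List Int)) (i : Nat) (x d : List Int) (h : i < l.length) :
    (l.set i x).getD i d = x := by
  simp [List.getD_eq_getElem?_getD, List.getElem?_set, h]

theorem getD_set_ne (l : List (List Int)) (i p : Nat) (x d : List Int) (h : p ≠ i) :
    (l.set i x).getD p d = l.getD p d := by
  simp only [List.getD_eq_getElem?_getD, List.getElem?_set]
  rw [if_neg (Ne.symm h)]

theorem set_getD_self (l : List (List Int)) (i : Nat) (d : List Int) (h : i < l.length) :
    l.set i (l.getD i d) = l := by
  rw [List.getD_eq_getElem?_getD, List.getElem?_eq_getElem h]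
  simpa using List.set_getElem_self h

theorem foldl_set_hoist (i : Nat) (f : List (List Int) → Nat → Int)
    (hf : ∀ dp x j, f (dp.set i x) j = f dp j) :
    ∀ (js : List Nat) (dp : List (List Int)), i < dp.length →
    js.foldl (fun dp j => dp.set i ((dp.getD i []).set j (f dp j))) dp
      = dp.set i (js.foldl (fun r j => r.set j (f dp j)) (dp.getD i [])) := by
  intro js
  induction js with
  | nil => intro dp h; exact (set_getD_self dp i [] h).symm
  | cons j js ih =>
    intro dp h
    simp only [List.foldl_cons]
    rw [ih (dp.set i ((dp.getD i []).set j (f dp j))) (by simpa using h)]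
    rw [List.set_set]
    congr 1
    · rw [getD_set_eq _ _ _ _ h]
      apply List.foldl_ext
      intro r k _
      rw [hf]

theorem fill_range' (h : Nat → Int) :
    ∀ (m s : Nat) (init : List Int), init.length = s + m →
    (List.range' s m).foldl (fun r j => r.set j (h j)) init
      = init.take s ++ (List.range' s m).map h := by
  intro m
  induction m with
  | zero => intro s init hl; simp [List.take_of_length_le (show init.length ≤ s by omega)]
  | succ m ih =>
    intro s init hl
    rw [List.range'_succ]
    simp only [List.foldl_cons, List.map_cons]
    rw [ih (s+1) (init.set s (h s)) (by simp [hl]; omega)]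
    have hs : s < init.length := by omega
    rw [List.take_set]
    rw [List.take_add_one]
    rw [List.getElem?_eq_getElem hs]
    have : (init.take s ++ [init[s]]).set s (h s) = init.take s ++ [h s] := by
      rw [List.set_append_right s (h s) (by simp)]
      congr 1
      have : s - (List.take s init).length = 0 := by simp [List.length_take]; omega
      rw [this]
      rfl
    simp only [Option.toList_some]
    rw [this, List.append_assoc]
    rfl

theorem map_getD_range (xs : List Int) :
    (List.range xs.length).map (fun j => xs.getD j 0) = xs := by
  apply List.ext_getElem
  · simp
  · intro k h1 h2
    simp [List.getD_eq_getElem?_getD, List.getElem?_eq_getElem h2]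

def rowsA (land : List (List Int)) : Nat → List Int
  | 0 => land.getD 0 []
  | i+1 => stepA (rowsA land i) (land.getD (i+1) [])

def dp0E (land : List (List Int)) : List (List Int) :=
  (List.range land.length).map (fun _ => (List.range (land.getD 0 []).length).map (fun _ => (0:Int)))

def dp1E (land : List (List Int)) : List (List Int) :=
  (List.range (land.getD 0 []).length).foldl
    (fun dp j => dp.set 0 ((dp.getD 0 []).set j ((land.getD 0 []).getD j 0))) (dp0E land)

def dp2E (land : List (List Int)) (m : Nat) : List (List Int) :=
  (List.range' 1 m).foldl (fun dp i =>
    (List.range (land.getD i []).length).foldl (fun dp j =>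
      dp.set i ((dp.getD i []).set j
        ((land.getD i []).getD j 0 + innerMax (land.getD i []).length (dp.getD (i-1) []) j))) dp)
    (dp1E land)

theorem stepA_length (prev row : List Int) : (stepA prev row).length = row.length := by
  simp [stepA]

theorem dp0_getD (land : List (List Int)) (k : Nat) (hk : k < land.length) :
    (dp0E land).getD k [] = (List.range (land.getD 0 []).length).map (fun _ => (0:Int)) := by
  simp [dp0E, List.getD_eq_getElem?_getD, List.getElem?_replicate, hk]

theorem dp0_length (land : List (List Int)) : (dp0E land).length = land.length := by
  simp [dp0E]

theorem dp1_eq (land : List (List Int)) (hn : 0 < land.length) :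
    dp1E land = (dp0E land).set 0 (land.getD 0 []) := by
  unfold dp1E
  rw [foldl_set_hoist 0 (fun _ j => (land.getD 0 []).getD j 0) (fun _ _ _ => rfl)
      _ _ (by rw [dp0_length]; exact hn)]
  congr 1
  rw [dp0_getD land 0 hn, List.range_eq_range']
  rw [fill_range' _ _ 0 _ (by simp)]
  simp only [List.take_zero, List.nil_append, ← List.range_eq_range']
  exact map_getD_range (land.getD 0 [])

theorem dp2_inv (land : List (List Int)) (hn : 0 < land.length)
    (hlen : ∀ k, k < land.length → (land.getD k []).length = (land.getD 0 []).length) :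
    ∀ m, m ≤ land.length - 1 →
    (dp2E land m).length = land.length
    ∧ (∀ k, k < land.length → ((dp2E land m).getD k []).length = (land.getD 0 []).length)
    ∧ (∀ k, k ≤ m → (dp2E land m).getD k [] = rowsA land k) := by
  intro m
  induction m with
  | zero =>
    intro _
    have h0 : dp2E land 0 = (dp0E land).set 0 (land.getD 0 []) := by
      unfold dp2E
      simpa using dp1_eq land hn
    rw [h0]
    refine ⟨by simp [dp0_length], ?_, ?_⟩
    · intro k hk
      by_cases hk0 : k = 0
      · subst hk0
        rw [getD_set_eq _ _ _ _ (by rw [dp0_length]; exact hn)]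
      · rw [getD_set_ne _ _ _ _ _ hk0, dp0_getD land k hk]
        simp
    · intro k hk
      interval_cases k
      rw [getD_set_eq _ _ _ _ (by rw [dp0_length]; exact hn)]
      rfl
  | succ m ih =>
    intro hm
    have hm' : m ≤ land.length - 1 := by omega
    obtain ⟨ih1, ih2, ih3⟩ := ih hm'
    have hstep : dp2E land (m+1)
        = (List.range (land.getD (m+1) []).length).foldl (fun dp j =>
            dp.set (m+1) ((dp.getD (m+1) []).set j
              ((land.getD (m+1) []).getD j 0
                + innerMax (land.getD (m+1) []).length (dp.getD (m+1-1) []) j))) (dp2E land m) := by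
      unfold dp2E
      rw [List.range'_concat]
      rw [show 1 + 1 * m = m + 1 by omega]
      rw [List.foldl_append]
      rfl
    have hmn : m + 1 < land.length := by omega
    have hw : (land.getD (m+1) []).length = (land.getD 0 []).length := hlen (m+1) hmn
    rw [hstep]
    rw [foldl_set_hoist (m+1)
        (fun dp j => (land.getD (m+1) []).getD j 0
          + innerMax (land.getD (m+1) []).length (dp.getD (m+1-1) []) j)
        (fun dp x j => by
          simp only [getD_set_ne dp (m+1) (m+1-1) x [] (by omega)])
        _ _ (by rw [ih1]; exact hmn)]
    have hinit : ((dp2E land m).getD (m+1) []).length = (land.getD (m+1) []).length := by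
      rw [ih2 (m+1) hmn, hw]
    have hrow : (List.range (land.getD (m+1) []).length).foldl
        (fun r j => r.set j ((land.getD (m+1) []).getD j 0
          + innerMax (land.getD (m+1) []).length ((dp2E land m).getD (m+1-1) []) j))
        ((dp2E land m).getD (m+1) []) = rowsA land (m+1) := by
      rw [List.range_eq_range', fill_range' _ _ 0 _ (by rw [hinit, Nat.zero_add])]
      have hprev : (dp2E land m).getD (m+1-1) [] = rowsA land m := ih3 m (by omega)
      rw [hprev]
      simp only [List.take_zero, List.nil_append, ← List.range_eq_range']
      rfl
    rw [hrow]
    refine ⟨by simpa using ih1, ?_, ?_⟩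
    · intro k hk
      by_cases hk0 : k = m+1
      · subst hk0
        rw [getD_set_eq _ _ _ _ (by rw [ih1]; exact hmn)]
        have : (rowsA land (m+1)).length = (land.getD (m+1) []).length := stepA_length _ _
        rw [this, hw]
      · rw [getD_set_ne _ _ _ _ _ hk0]
        exact ih2 k hk
    · intro k hk
      by_cases hk0 : k = m+1
      · subst hk0
        rw [getD_set_eq _ _ _ _ (by rw [ih1]; exact hmn)]
      · rw [getD_set_ne _ _ _ _ _ hk0]
        exact ih3 k (by omega)



theorem solution_eq (land : List (List Int)) :
    solution land = (PySem.List.max? ((dp2E land (land.length - 1)).getD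
      ((dp2E land (land.length - 1)).length - 1) []) (fun x => x)).getD 0 := rfl

theorem chainB (land : List (List Int)) (hn : 0 < land.length)
    (hlen : ∀ k, k < land.length → (land.getD k []).length = (land.getD 0 []).length) :
    ∀ m, m ≤ land.length - 1 →
    (land.tail.take m).foldl stepB (land.getD 0 []) = rowsA land m
    ∧ (rowsA land m).length = (land.getD 0 []).length := by
  intro m
  induction m with
  | zero => exact fun _ => ⟨rfl, rfl⟩
  | succ m ih =>
    intro hm
    obtain ⟨ih1, ih2⟩ := ih (by omega)
    have hmt : m < land.tail.length := by simp [List.length_tail]; omega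
    have hm1 : m + 1 < land.length := by omega
    rw [List.take_add_one, List.getElem?_eq_getElem hmt]
    simp only [Option.toList_some, List.foldl_append, List.foldl_cons, List.foldl_nil]
    rw [ih1]
    have htl : land.tail[m] = land.getD (m+1) [] := by
      rw [List.getElem_tail]
      rw [List.getD_eq_getElem?_getD, List.getElem?_eq_getElem hm1]
      rfl
    rw [htl]
    have hl : (rowsA land m).length = (land.getD (m+1) []).length := by
      rw [ih2, hlen (m+1) hm1]
    rw [stepB_eq_stepA _ _ hl]
    exact ⟨rfl, by rw [show rowsA land (m+1) = stepA (rowsA land m) (land.getD (m+1) []) from rfl,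
      stepA_length, hlen (m+1) hm1]⟩

theorem main_eq (land : List (List Int)) (h1 : land ≠ [])
    (hrect : ∀ row ∈ land, row.length = (land.getD 0 []).length) :
    solution land = solution_alt land := by
  have hn : 0 < land.length := List.length_pos_iff.mpr h1
  have hlen : ∀ k, k < land.length → (land.getD k []).length = (land.getD 0 []).length := by
    intro k hk
    rw [List.getD_eq_getElem?_getD, List.getElem?_eq_getElem hk]
    exact hrect land[k] (List.getElem_mem hk)
  obtain ⟨i1, i2, i3⟩ := dp2_inv land hn hlen (land.length - 1) (le_refl _)
  rw [solution_eq, i1]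
  rw [i3 (land.length - 1) (le_refl _)]
  show _ = solution_alt land
  unfold solution_alt
  obtain ⟨c1, c2⟩ := chainB land hn hlen (land.length - 1) (le_refl _)
  have : land.tail.take (land.length - 1) = land.tail := by
    apply List.take_of_length_le
    simp [List.length_tail]
  rw [this] at c1
  rw [c1]

-- ===== VERDICT (by name: the statement is the Claim_ definition above) =====
theorem solution_spec : Claim_equal_solution := by
  intro land _ hpre
  obtain ⟨h1, _, hrect⟩ := hpre
  unfold Spec_solution
  exact main_eq land h1 hrect
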